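-- pv_equiv track=rewrite | github.com/wschosta/dod-budget-analysis | utils/query.py | amount_col_to_label
-- ===== SOURCE A (Python) =====
-- def amount_col_to_label(col: str) -> str:
--     """Convert an amount column name to a human-readable label.
--
--     Example: 'amount_fy2024_actual' → 'FY2024 Actual'
--     """
--     label = col.replace("amount_fy", "FY")
--     for suffix, replacement in [
--         ("_actual", " Actual"), ("_enacted", " Enacted"),
--         ("_request", " Request"), ("_total", " Total"),
--         ("_supplemental", " Supplemental"), ("_reconciliation", " Reconciliation"),
--     ]:
--         label = label.replace(suffix, replacement)
--     return label
-- ===== SOURCE B (Python) =====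
-- _TABLE = [
--     ("amount_fy", "FY"),
--     ("_actual", " Actual"), ("_enacted", " Enacted"),
--     ("_request", " Request"), ("_total", " Total"),
--     ("_supplemental", " Supplemental"), ("_reconciliation", " Reconciliation"),
-- ]
--
--
-- def amount_col_to_label(col: str) -> str:
--     """Single left-to-right scan replacing each table literal where it occurs."""
--     out = []
--     i = 0
--     n = len(col)
--     while i < n:
--         for pat, rep in _TABLE:
--             if col.startswith(pat, i):
--                 out.append(rep)
--                 i += len(pat)
--                 break
--         else:
--             out.append(col[i])
--             i += 1
--     return "".join(out)
-- ===== Notes on version B (the rewrite author's own statement) =====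
-- stated objective: alternative
-- what changed: A rewrites the column name with seven sequential full-string str.replace passes; B makes a single left-to-right scan, consulting an ordered (literal, label) table at each position and emitting the replacement where a literal matches, so the string is traversed once.
import Mathlib
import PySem

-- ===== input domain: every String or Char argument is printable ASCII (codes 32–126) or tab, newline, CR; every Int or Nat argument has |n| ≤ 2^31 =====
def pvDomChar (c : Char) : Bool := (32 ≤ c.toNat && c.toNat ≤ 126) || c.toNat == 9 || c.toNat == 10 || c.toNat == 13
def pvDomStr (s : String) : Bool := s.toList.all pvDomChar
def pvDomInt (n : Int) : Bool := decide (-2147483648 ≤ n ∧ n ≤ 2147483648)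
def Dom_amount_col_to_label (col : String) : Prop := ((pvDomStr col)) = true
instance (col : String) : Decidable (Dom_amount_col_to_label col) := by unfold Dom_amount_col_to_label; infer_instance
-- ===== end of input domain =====

-- B replaces A's seven sequential full-string .replace passes by one left-to-right scan with a
-- literal→label table consulted at each position (objective: alternative — same result, one pass).

-- ===== PORT A =====
def amount_col_to_label (col : String) : String :=
  let label := PySem.Str.replace col "amount_fy" "FY"
  List.foldl (fun label sr => PySem.Str.replace label sr.1 sr.2) label
    [("_actual", " Actual"), ("_enacted", " Enacted"), ("_request", " Request"),
     ("_total", " Total"), ("_supplemental", " Supplemental"),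
     ("_reconciliation", " Reconciliation")]

-- ===== PORT B =====
-- table of (pattern, replacement) literals, tried in order at each position
def pvTable : List (List Char × List Char) :=
  [("amount_fy".toList, "FY".toList),
   ("_actual".toList, " Actual".toList), ("_enacted".toList, " Enacted".toList),
   ("_request".toList, " Request".toList), ("_total".toList, " Total".toList),
   ("_supplemental".toList, " Supplemental".toList),
   ("_reconciliation".toList, " Reconciliation".toList)]

def pvTryMatch : List (List Char × List Char) → List Char → Option (Nat × List Char)
  | [], _ => none
  | (p, r) :: tb, l => if p.isPrefixOf l then some (p.length, r) else pvTryMatch tb l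

def pvScanGo : Nat → List Char → List Char
  | _, [] => []
  | 0, l => l
  | f + 1, c :: t =>
    match pvTryMatch pvTable (c :: t) with
    | some (k, r) => r ++ pvScanGo f ((c :: t).drop k)
    | none => c :: pvScanGo f t

def amount_col_to_label_alt (col : String) : String :=
  String.ofList (pvScanGo col.toList.length col.toList)

-- ===== PRECONDITION & SPEC =====
def Spec_amount_col_to_label (col : String) (out : String) : Prop := out = amount_col_to_label_alt col
instance (col : String) (out : String) : Decidable (Spec_amount_col_to_label col out) := by unfold Spec_amount_col_to_label; infer_instance

-- ===== CLAIM (what is proved, stated in full; the proofs are below) =====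
def Claim_equal_amount_col_to_label : Prop := ∀ (col : String), Dom_amount_col_to_label col → Spec_amount_col_to_label col (amount_col_to_label col)

-- ===== LEMMAS AND PROOFS =====
theorem go_acc (old new : List Char) : ∀ (fuel : Nat) (l acc : List Char),
    PySem.Chars.replace.go old new fuel l acc = acc.reverse ++ PySem.Chars.replace.go old new fuel l [] := by
  intro fuel
  induction fuel with
  | zero => intro l acc; simp [PySem.Chars.replace.go]
  | succ f ih =>
    intro l acc
    cases l with
    | nil => simp [PySem.Chars.replace.go]
    | cons c t =>
      simp only [PySem.Chars.replace.go]
      split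
      · rw [ih (List.drop old.length (c :: t)) (new.reverse ++ acc),
            ih (List.drop old.length (c :: t)) (new.reverse ++ [])]
        simp
      · rw [ih t (c :: acc), ih t [c]]; simp

theorem go_fuel (old new : List Char) (hp : old ≠ []) : ∀ (f1 f2 : Nat) (l acc : List Char),
    l.length ≤ f1 → l.length ≤ f2 →
    PySem.Chars.replace.go old new f1 l acc = PySem.Chars.replace.go old new f2 l acc := by
  intro f1
  induction f1 with
  | zero =>
    intro f2 l acc h1 h2
    have : l = [] := List.eq_nil_of_length_eq_zero (Nat.le_zero.mp h1)
    subst this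
    cases f2 <;> simp [PySem.Chars.replace.go]
  | succ f ih =>
    intro f2 l acc h1 h2
    cases l with
    | nil => cases f2 <;> simp [PySem.Chars.replace.go]
    | cons c t =>
      cases f2 with
      | zero => simp at h2
      | succ g =>
        simp only [PySem.Chars.replace.go]
        split
        · rename_i hpre
          apply ih
          · have := List.IsPrefix.length_le (List.isPrefixOf_iff_prefix.mp hpre)
            have hol : 1 ≤ old.length := List.length_pos_iff.mpr hp
            simp only [List.length_drop, List.length_cons] at *
            omega
          · have hol : 1 ≤ old.length := List.length_pos_iff.mpr hp
            simp only [List.length_drop, List.length_cons] at *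
            omega
        · apply ih <;> simp_all <;> omega

theorem rep_nil (old new : List Char) (hp : old ≠ []) :
    PySem.Chars.replace [] old new = [] := by
  cases old with
  | nil => exact absurd rfl hp
  | cons o t => simp [PySem.Chars.replace, PySem.Chars.replace.go]

theorem rep_unfold (old new : List Char) (hp : old ≠ []) (l : List Char) :
    PySem.Chars.replace l old new = PySem.Chars.replace.go old new l.length l [] := by
  simp [PySem.Chars.replace, List.isEmpty_iff, hp]

theorem rep_head (old new x : List Char) (hp : old ≠ []) :
    PySem.Chars.replace (old ++ x) old new = new ++ PySem.Chars.replace x old new := by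
  obtain ⟨o, old', rfl⟩ : ∃ o old', old = o :: old' := by
    cases old with
    | nil => exact absurd rfl hp
    | cons o t => exact ⟨o, t, rfl⟩
  rw [rep_unfold _ _ hp, rep_unfold _ _ hp]
  have hlen : ((o :: old') ++ x).length = (old'.length + x.length) + 1 := by simp
  have hcons : (o :: old') ++ x = o :: (old' ++ x) := by simp
  rw [hlen, hcons]
  simp only [PySem.Chars.replace.go]
  rw [if_pos (List.isPrefixOf_iff_prefix.mpr (by exact ⟨x, by simp⟩))]
  have hdrop : List.drop (o :: old').length (o :: (old' ++ x)) = x := by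
    simpa using List.drop_left' (l₁ := o :: old') (l₂ := x) rfl
  rw [hdrop, go_acc]
  rw [go_fuel (o :: old') new (by simp) (old'.length + x.length) x.length x [] (by omega) le_rfl]
  simp

theorem rep_step (old new : List Char) (c : Char) (t : List Char) (hp : old ≠ [])
    (h : ¬ old <+: (c :: t)) :
    PySem.Chars.replace (c :: t) old new = c :: PySem.Chars.replace t old new := by
  rw [rep_unfold _ _ hp, rep_unfold _ _ hp]
  simp only [List.length_cons, PySem.Chars.replace.go]
  rw [if_neg (by simpa [List.isPrefixOf_iff_prefix] using h), go_acc]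
  simp
def pvClash (p u : List Char) : Bool := (p.zip u).any (fun a => a.1 != a.2)

def pvSegSafe (p : List Char) : List Char → Bool
  | [] => true
  | c :: u' => pvClash p (c :: u') && pvSegSafe p u'

theorem clash_not_prefix : ∀ (p u x : List Char), pvClash p u = true → ¬ p <+: (u ++ x) := by
  intro p
  induction p with
  | nil => intro u x h; simp [pvClash] at h
  | cons a p' ih =>
    intro u x h
    cases u with
    | nil => simp [pvClash] at h
    | cons b u' =>
      simp only [pvClash, List.zip_cons_cons, List.any_cons, Bool.or_eq_true, bne_iff_ne] at h
      intro hpre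
      rw [List.cons_append, List.cons_prefix_cons] at hpre
      rcases h with h | h
      · exact h hpre.1
      · exact ih u' x h hpre.2

theorem rep_seg (old new : List Char) (hp : old ≠ []) :
    ∀ (u x : List Char), pvSegSafe old u = true →
    PySem.Chars.replace (u ++ x) old new = u ++ PySem.Chars.replace x old new := by
  intro u
  induction u with
  | nil => intro x _; simp
  | cons c u' ih =>
    intro x h
    simp only [pvSegSafe, Bool.and_eq_true] at h
    rw [List.cons_append, rep_step old new c (u' ++ x) hp (clash_not_prefix _ _ _ h.1)]
    rw [ih x h.2]
    simp

theorem rep_refl (old : List Char) (hp : old ≠ []) (n0 : Char) (new' : List Char) :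
    ∀ (n : Nat) (Y w : List Char), Y.length ≤ n → n0 ∉ w →
    w <+: PySem.Chars.replace Y old (n0 :: new') → w <+: Y := by
  intro n
  induction n with
  | zero =>
    intro Y w hn _ hpre
    have : Y = [] := List.eq_nil_of_length_eq_zero (Nat.le_zero.mp hn)
    subst this
    rwa [rep_nil _ _ hp] at hpre
  | succ m ih =>
    intro Y w hn hw hpre
    cases Y with
    | nil => rwa [rep_nil _ _ hp] at hpre
    | cons c t =>
      by_cases hm : old <+: (c :: t)
      · obtain ⟨Y', hY⟩ := hm
        rw [← hY, rep_head _ _ _ hp] at hpre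
        cases w with
        | nil => exact List.nil_prefix
        | cons w0 w' =>
          rw [show (n0 :: new' ++ PySem.Chars.replace Y' old (n0 :: new')) =
                n0 :: (new' ++ PySem.Chars.replace Y' old (n0 :: new')) from rfl,
              List.cons_prefix_cons] at hpre
          exact absurd (hpre.1 ▸ List.mem_cons_self) hw
      · rw [rep_step _ _ _ _ hp hm] at hpre
        cases w with
        | nil => exact List.nil_prefix
        | cons w0 w' =>
          rw [List.cons_prefix_cons] at hpre
          rw [List.cons_prefix_cons]
          refine ⟨hpre.1, ih t w' (by simpa using Nat.lt_succ_iff.mp (by simpa using hn)) ?_ hpre.2⟩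
          exact fun hmem => hw (List.mem_cons_of_mem _ hmem)

-- chain over a table, head entry first (A's order)
def pvChainFrom : List (List Char × List Char) → List Char → List Char
  | [], l => l
  | (p, r) :: tb, l => pvChainFrom tb (PySem.Chars.replace l p r)

theorem tryMatch_some : ∀ (tb : List (List Char × List Char)) (l : List Char) (k : Nat) (r : List Char),
    (∀ pr ∈ tb, pr.1 ≠ []) → pvTryMatch tb l = some (k, r) → 1 ≤ k ∧ k ≤ l.length := by
  intro tb
  induction tb with
  | nil => intro l k r _ h; simp [pvTryMatch] at h
  | cons pr0 tb ih =>
    intro l k r hne h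
    obtain ⟨p, r0⟩ := pr0
    simp only [pvTryMatch] at h
    split at h
    · rename_i hpre
      simp only [Option.some.injEq, Prod.mk.injEq] at h
      obtain ⟨hk, hr⟩ := h
      constructor
      · have hpne : p ≠ [] := hne (p, r0) (by simp)
        have := List.length_pos_iff.mpr hpne
        omega
      · have := (List.isPrefixOf_iff_prefix.mp hpre).length_le
        omega
    · exact ih l k r (fun pr h' => hne pr (List.mem_cons_of_mem _ h')) h

theorem scan_fuel (f : Nat) : ∀ (l : List Char), l.length ≤ f →
    pvScanGo f l = pvScanGo l.length l := by
  induction f using Nat.strong_induction_on with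
  | _ f ih =>
    intro l h
    match f, l with
    | 0, [] => rfl
    | m + 1, [] => rfl
    | 0, c :: t => simp at h
    | m + 1, c :: t =>
      simp only [pvScanGo, List.length_cons]
      cases hm : pvTryMatch pvTable (c :: t) with
      | some kr =>
        obtain ⟨k, r⟩ := kr
        have hk := tryMatch_some pvTable (c :: t) k r (by decide) hm
        show r ++ pvScanGo m (List.drop k (c :: t)) = r ++ pvScanGo t.length (List.drop k (c :: t))
        rw [ih m (by omega) (List.drop k (c :: t)) (by simp at hk h ⊢; omega),
            ih t.length (by simp at h; omega) (List.drop k (c :: t)) (by simp at hk ⊢; omega)]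
      | none =>
        show c :: pvScanGo m t = c :: pvScanGo t.length t
        rw [ih m (by omega) t (by simp at h ⊢; omega)]

def pvScan (l : List Char) : List Char := pvScanGo l.length l

theorem pvScan_match (c : Char) (t : List Char) (k : Nat) (r : List Char)
    (h : pvTryMatch pvTable (c :: t) = some (k, r)) :
    pvScan (c :: t) = r ++ pvScan ((c :: t).drop k) := by
  have hk := tryMatch_some pvTable (c :: t) k r (by decide) h
  unfold pvScan
  conv_lhs => simp only [List.length_cons, pvScanGo, h]
  rw [scan_fuel t.length (List.drop k (c :: t)) (by simp at hk ⊢; omega)]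

theorem pvScan_nomatch (c : Char) (t : List Char)
    (h : pvTryMatch pvTable (c :: t) = none) :
    pvScan (c :: t) = c :: pvScan t := by
  unfold pvScan
  conv_lhs => simp only [List.length_cons, pvScanGo, h]

-- chain lemmas
theorem chainFrom_nil : ∀ (tb : List (List Char × List Char)),
    (∀ pr ∈ tb, pr.1 ≠ []) → pvChainFrom tb [] = [] := by
  intro tb
  induction tb with
  | nil => intro _; rfl
  | cons pr tb ih =>
    intro h
    obtain ⟨p, r⟩ := pr
    simp only [pvChainFrom]
    rw [rep_nil _ _ (h (p, r) (by simp))]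
    exact ih (fun pr h' => h pr (List.mem_cons_of_mem _ h'))

theorem chainFrom_append (tb1 tb2 : List (List Char × List Char)) :
    ∀ l, pvChainFrom (tb1 ++ tb2) l = pvChainFrom tb2 (pvChainFrom tb1 l) := by
  induction tb1 with
  | nil => intro l; rfl
  | cons pr tb ih =>
    intro l
    obtain ⟨p, r⟩ := pr
    simp only [List.cons_append, pvChainFrom]
    exact ih _

theorem chainFrom_seg : ∀ (tb : List (List Char × List Char)) (u x : List Char),
    (∀ pr ∈ tb, pr.1 ≠ [] ∧ pvSegSafe pr.1 u = true) →
    pvChainFrom tb (u ++ x) = u ++ pvChainFrom tb x := by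
  intro tb
  induction tb with
  | nil => intro u x _; rfl
  | cons pr tb ih =>
    intro u x h
    obtain ⟨p, r⟩ := pr
    have hp := h (p, r) (by simp)
    simp only [pvChainFrom]
    rw [rep_seg p r hp.1 u x hp.2]
    exact ih u _ (fun pr h' => h pr (List.mem_cons_of_mem _ h'))

-- cross-safety of a table: patterns/replacements nonempty, and no replacement's
-- head character occurs in any pattern's tail
def pvHyp (tb : List (List Char × List Char)) : Prop :=
  (∀ pr ∈ tb, pr.1 ≠ [] ∧ pr.2 ≠ []) ∧
  ∀ pr ∈ tb, ∀ qs ∈ tb, pr.2.head! ∉ qs.1.tail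

theorem pvHyp_sub (pr0 : List Char × List Char) (tb : List (List Char × List Char))
    (h : pvHyp (pr0 :: tb)) : pvHyp tb :=
  ⟨fun pr h' => h.1 pr (List.mem_cons_of_mem _ h'),
   fun pr h' qs h'' => h.2 pr (List.mem_cons_of_mem _ h') qs (List.mem_cons_of_mem _ h'')⟩

theorem chainFrom_cons : ∀ (tb : List (List Char × List Char)) (c : Char) (t : List Char),
    pvHyp tb → (∀ pr ∈ tb, ¬ pr.1 <+: (c :: t)) →
    pvChainFrom tb (c :: t) = c :: pvChainFrom tb t := by
  intro tb
  induction tb with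
  | nil => intro c t _ _; rfl
  | cons pr0 tb ih =>
    intro c t hhyp hno
    obtain ⟨p, r⟩ := pr0
    have hpne : p ≠ [] := (hhyp.1 (p, r) (by simp)).1
    have hrne : r ≠ [] := (hhyp.1 (p, r) (by simp)).2
    obtain ⟨r0, r', rfl⟩ : ∃ r0 r', r = r0 :: r' := by
      cases r with
      | nil => exact absurd rfl hrne
      | cons a b => exact ⟨a, b, rfl⟩
    simp only [pvChainFrom]
    rw [rep_step p _ c t hpne (hno (p, r0 :: r') (by simp))]
    rw [ih c (PySem.Chars.replace t p (r0 :: r')) (pvHyp_sub _ _ hhyp) ?_]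
    intro qs hqs hqpre
    obtain ⟨q, s⟩ := qs
    have hqne : q ≠ [] := ((pvHyp_sub _ _ hhyp).1 (q, s) hqs).1
    obtain ⟨q0, q', rfl⟩ : ∃ q0 q', q = q0 :: q' := by
      cases q with
      | nil => exact absurd rfl hqne
      | cons a b => exact ⟨a, b, rfl⟩
    rw [List.cons_prefix_cons] at hqpre
    have hnm : r0 ∉ q' := by
      have := hhyp.2 (p, r0 :: r') (by simp) (q0 :: q', s) (List.mem_cons_of_mem _ hqs)
      simpa using this
    have hq't : q' <+: t :=
      rep_refl p hpne r0 r' t.length t q' le_rfl hnm hqpre.2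
    exact hno (q0 :: q', s) (List.mem_cons_of_mem _ hqs)
      (by rw [List.cons_prefix_cons]; exact ⟨hqpre.1, hq't⟩)

theorem pvScan_match' (l : List Char) (hl : l ≠ []) (k : Nat) (r : List Char)
    (h : pvTryMatch pvTable l = some (k, r)) :
    pvScan l = r ++ pvScan (l.drop k) := by
  cases l with
  | nil => exact absurd rfl hl
  | cons c t => exact pvScan_match c t k r h

theorem pvScan_nomatch' (c : Char) (t : List Char)
    (h : pvTryMatch pvTable (c :: t) = none) :
    pvScan (c :: t) = c :: pvScan t := pvScan_nomatch c t h

theorem pvBranch (tb1 tb2 : List (List Char × List Char)) (pi ri cs rest : List Char)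
    (htable : pvTable = tb1 ++ (pi, ri) :: tb2)
    (hpne : pi ≠ [])
    (hseg1 : ∀ pr ∈ tb1, pr.1 ≠ [] ∧ pvSegSafe pr.1 pi = true)
    (hseg2 : ∀ pr ∈ tb2, pr.1 ≠ [] ∧ pvSegSafe pr.1 ri = true)
    (hcs : cs = pi ++ rest)
    (hih : pvChainFrom pvTable rest = pvScan rest)
    (hmatch : pvTryMatch pvTable cs = some (pi.length, ri)) :
    pvChainFrom pvTable cs = pvScan cs := by
  subst hcs
  rw [pvScan_match' _ (by simp [hpne]) _ _ hmatch, List.drop_left]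
  rw [htable, chainFrom_append, chainFrom_seg tb1 pi rest hseg1]
  simp only [pvChainFrom]
  rw [rep_head pi ri (pvChainFrom tb1 rest) hpne]
  rw [chainFrom_seg tb2 ri _ hseg2]
  rw [htable, chainFrom_append] at hih
  simp only [pvChainFrom] at hih
  rw [hih]

theorem pvMain : ∀ (n : Nat) (cs : List Char), cs.length ≤ n →
    pvChainFrom pvTable cs = pvScan cs := by
  intro n
  induction n with
  | zero =>
    intro cs h
    have : cs = [] := List.eq_nil_of_length_eq_zero (Nat.le_zero.mp h)
    subst this
    rw [chainFrom_nil pvTable (by decide)]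
    rfl
  | succ m ih =>
    intro cs hlen
    by_cases h1 : "amount_fy".toList <+: cs
    · obtain ⟨rest, hcs⟩ := h1
      exact pvBranch [] _ "amount_fy".toList "FY".toList cs rest rfl (by decide)
        (by decide) (by decide) hcs.symm
        (ih rest (by subst hcs; simp at hlen ⊢; omega))
        (by rw [← hcs]; simp [pvTryMatch, pvTable, List.isPrefixOf_iff_prefix])
    · by_cases h2 : "_actual".toList <+: cs
      · obtain ⟨rest, hcs⟩ := h2
        exact pvBranch [("amount_fy".toList, "FY".toList)] _ "_actual".toList " Actual".toList cs rest rfl (by decide)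
          (by decide) (by decide) hcs.symm
          (ih rest (by subst hcs; simp at hlen ⊢; omega))
          (by simp [pvTryMatch, pvTable, List.isPrefixOf_iff_prefix, h1, ← hcs])
      · by_cases h3 : "_enacted".toList <+: cs
        · obtain ⟨rest, hcs⟩ := h3
          exact pvBranch [("amount_fy".toList, "FY".toList), ("_actual".toList, " Actual".toList)] _ "_enacted".toList " Enacted".toList cs rest rfl (by decide)
            (by decide) (by decide) hcs.symm
            (ih rest (by subst hcs; simp at hlen ⊢; omega))
            (by simp [pvTryMatch, pvTable, List.isPrefixOf_iff_prefix, h1, h2, ← hcs])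
        · by_cases h4 : "_request".toList <+: cs
          · obtain ⟨rest, hcs⟩ := h4
            exact pvBranch [("amount_fy".toList, "FY".toList), ("_actual".toList, " Actual".toList), ("_enacted".toList, " Enacted".toList)] _ "_request".toList " Request".toList cs rest rfl (by decide)
              (by decide) (by decide) hcs.symm
              (ih rest (by subst hcs; simp at hlen ⊢; omega))
              (by simp [pvTryMatch, pvTable, List.isPrefixOf_iff_prefix, h1, h2, h3, ← hcs])
          · by_cases h5 : "_total".toList <+: cs
            · obtain ⟨rest, hcs⟩ := h5
              exact pvBranch [("amount_fy".toList, "FY".toList), ("_actual".toList, " Actual".toList), ("_enacted".toList, " Enacted".toList), ("_request".toList, " Request".toList)] _ "_total".toList " Total".toList cs rest rfl (by decide)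
                (by decide) (by decide) hcs.symm
                (ih rest (by subst hcs; simp at hlen ⊢; omega))
                (by simp [pvTryMatch, pvTable, List.isPrefixOf_iff_prefix, h1, h2, h3, h4, ← hcs])
            · by_cases h6 : "_supplemental".toList <+: cs
              · obtain ⟨rest, hcs⟩ := h6
                exact pvBranch [("amount_fy".toList, "FY".toList), ("_actual".toList, " Actual".toList), ("_enacted".toList, " Enacted".toList), ("_request".toList, " Request".toList), ("_total".toList, " Total".toList)] _ "_supplemental".toList " Supplemental".toList cs rest rfl (by decide)
                  (by decide) (by decide) hcs.symm
                  (ih rest (by subst hcs; simp at hlen ⊢; omega))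
                  (by simp [pvTryMatch, pvTable, List.isPrefixOf_iff_prefix, h1, h2, h3, h4, h5, ← hcs])
              · by_cases h7 : "_reconciliation".toList <+: cs
                · obtain ⟨rest, hcs⟩ := h7
                  exact pvBranch [("amount_fy".toList, "FY".toList), ("_actual".toList, " Actual".toList), ("_enacted".toList, " Enacted".toList), ("_request".toList, " Request".toList), ("_total".toList, " Total".toList), ("_supplemental".toList, " Supplemental".toList)] _ "_reconciliation".toList " Reconciliation".toList cs rest rfl (by decide)
                    (by decide) (by decide) hcs.symm
                    (ih rest (by subst hcs; simp at hlen ⊢; omega))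
                    (by simp [pvTryMatch, pvTable, List.isPrefixOf_iff_prefix, h1, h2, h3, h4, h5, h6, ← hcs])
                · have hno : ∀ pr ∈ pvTable, ¬ pr.1 <+: cs := by
                    intro pr hmem
                    simp only [pvTable, List.mem_cons, List.not_mem_nil, or_false] at hmem
                    rcases hmem with rfl | rfl | rfl | rfl | rfl | rfl | rfl
                    exacts [h1, h2, h3, h4, h5, h6, h7]
                  cases cs with
                  | nil => rw [chainFrom_nil pvTable (by decide)]; rfl
                  | cons c t =>
                    have hnone : pvTryMatch pvTable (c :: t) = none := by
                      simp only [pvTryMatch, pvTable]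
                      rw [if_neg (by simpa [List.isPrefixOf_iff_prefix] using h1),
                          if_neg (by simpa [List.isPrefixOf_iff_prefix] using h2),
                          if_neg (by simpa [List.isPrefixOf_iff_prefix] using h3),
                          if_neg (by simpa [List.isPrefixOf_iff_prefix] using h4),
                          if_neg (by simpa [List.isPrefixOf_iff_prefix] using h5),
                          if_neg (by simpa [List.isPrefixOf_iff_prefix] using h6),
                          if_neg (by simpa [List.isPrefixOf_iff_prefix] using h7)]
                    rw [chainFrom_cons pvTable c t (by unfold pvHyp; exact ⟨by decide, by decide⟩) hno, pvScan_nomatch' c t hnone,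
                        ih t (by simp at hlen; omega)]

theorem pvFinal (col : String) : amount_col_to_label col = amount_col_to_label_alt col := by
  have h := pvMain col.toList.length col.toList le_rfl
  simp only [pvChainFrom, pvTable, pvScan] at h
  simp only [amount_col_to_label, amount_col_to_label_alt, List.foldl, PySem.Str.replace,
             String.toList_ofList]
  rw [h]

-- ===== VERDICT (by name: the statement is the Claim_ definition above) =====
theorem amount_col_to_label_spec : Claim_equal_amount_col_to_label := by
  intro col _
  show amount_col_to_label col = amount_col_to_label_alt col
  exact pvFinal col
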